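-- pv_equiv track=rewrite | github.com/2021145152/IRMV | pddl/scripts/pddl_writer.py | generate_objects
-- ===== SOURCE A (Python) =====
-- from typing import Dict, List, Any
--
-- def generate_objects(types_map: Dict[str, str]) -> str:
--     """
--     Generate objects section.
--
--     Args:
--         types_map: Dict mapping object_id to type
--
--     Returns:
--         PDDL objects section string
--     """
--     # Group by type
--     types_grouped = {}
--     for obj_id, obj_type in types_map.items():
--         if obj_type not in types_grouped:
--             types_grouped[obj_type] = []
--         types_grouped[obj_type].append(obj_id)
--
--     # Generate PDDL
--     lines = ["  (:objects"]
--
--     # Add comment for each type group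
--     for obj_type in sorted(types_grouped.keys()):
--         obj_ids = sorted(types_grouped[obj_type])
--         lines.append(f"    ; {obj_type}")
--         lines.append(f"    {' '.join(obj_ids)} - {obj_type}")
--         lines.append("")
--
--     # Remove last empty line and add closing
--     lines = lines[:-1]
--     lines.append("  )")
--
--     return "\n".join(lines)
-- ===== SOURCE B (Python) =====
-- def generate_objects(types_map):
--     """
--     Generate objects section.
--
--     Args:
--         types_map: Dict mapping object_id to type
--
--     Returns:
--         PDDL objects section string
--     """
--     types = sorted(set(types_map.values()))
--     blocks = [
--         "    ; {0}\n    {1} - {0}".format(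
--             t, " ".join(sorted(k for k, v in types_map.items() if v == t)))
--         for t in types
--     ]
--     if not blocks:
--         return "  (:objects\n  )"
--     return "  (:objects\n" + "\n\n".join(blocks) + "\n  )"
-- ===== Notes on version B (the rewrite author's own statement) =====
-- stated objective: simpler
-- what changed: B drops A's dict-grouping pass and its append-three-lines-then-trim list surgery: it iterates the sorted distinct types directly, renders each group's two-line block by filtering the ids of that type, and joins the blocks with blank lines, closing the section explicitly.
-- intended difference: On the empty dict A's lines[:-1] slice deletes the ' (:objects' opening line and A returns ' )', while B returns the well-formed ' (:objects\n )', which is the intended objects section. — e.g. on generate_objects([]): A returns " )", B returns " (:objects\n )"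
import Mathlib
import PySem

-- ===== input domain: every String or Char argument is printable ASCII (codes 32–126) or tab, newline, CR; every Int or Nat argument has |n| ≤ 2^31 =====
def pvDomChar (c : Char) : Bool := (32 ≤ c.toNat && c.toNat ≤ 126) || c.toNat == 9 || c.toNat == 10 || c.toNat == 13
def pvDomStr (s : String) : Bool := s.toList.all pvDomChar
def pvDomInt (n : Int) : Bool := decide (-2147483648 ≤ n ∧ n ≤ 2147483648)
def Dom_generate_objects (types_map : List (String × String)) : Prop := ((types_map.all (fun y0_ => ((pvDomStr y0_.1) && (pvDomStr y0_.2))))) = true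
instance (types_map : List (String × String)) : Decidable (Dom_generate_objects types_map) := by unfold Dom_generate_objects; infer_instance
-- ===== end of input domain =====

-- B emits each type's comment/line block directly from the sorted distinct types (filtering per type),
-- instead of A's dict-grouping pass followed by append-three-lines-and-trim; on the empty dict B keeps
-- the "  (:objects" opening that A's lines[:-1] slicing accidentally removes.

-- ===== PORT A =====
-- 'types_map' is a Python dict; PySem.Dict.ofList normalizes the association list to dict
-- semantics (unique keys: last value wins at first-insertion position) before iterating .items().
def generate_objects (types_map : List (String × String)) : String :=
  let items := (PySem.Dict.ofList types_map).items
  let types_grouped : PySem.Dict String (List String) :=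
    items.foldl (fun d p =>
      let d' := if d.contains p.2 then d else d.insert p.2 ([] : List String)
      d'.modify p.2 [] (fun ls => ls ++ [p.1])) PySem.Dict.empty
  let lines : List String := ["  (:objects"]
  let lines := (PySem.List.sorted types_grouped.keys (fun t => t) false).foldl
    (fun acc obj_type =>
      let obj_ids := PySem.List.sorted (types_grouped.getD obj_type []) (fun s => s) false
      ((acc ++ ["    ; " ++ obj_type]) ++
        ["    " ++ PySem.Str.join " " obj_ids ++ " - " ++ obj_type]) ++ [""]) lines
  let lines := PySem.List.slice lines none (some (-1)) ++ ["  )"]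
  PySem.Str.join "\n" lines

-- ===== PORT B =====
def generate_objects_alt (types_map : List (String × String)) : String :=
  let items := (PySem.Dict.ofList types_map).items
  let types := PySem.List.sorted (PySem.Set.ofList (items.map Prod.snd)) (fun t => t) false
  let blocks := types.map (fun t =>
    "    ; " ++ t ++ "\n    " ++
      PySem.Str.join " " (PySem.List.sorted ((items.filter (fun p => p.2 == t)).map Prod.fst) (fun s => s) false)
      ++ " - " ++ t)
  if blocks = [] then "  (:objects\n  )"
  else "  (:objects\n" ++ PySem.Str.join "\n\n" blocks ++ "\n  )"

-- ===== PRECONDITION & SPEC =====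
-- On the empty dict A returns "  )" (its lines[:-1] slice deletes the "  (:objects" opening
-- when there are no groups), while B returns the well-formed "  (:objects\n  )", which is the
-- intended objects section.
def D_generate_objects (types_map : List (String × String)) : Prop := types_map = []
instance (types_map : List (String × String)) : Decidable (D_generate_objects types_map) := by unfold D_generate_objects; infer_instance
def Spec_generate_objects (types_map : List (String × String)) (out : String) : Prop := ¬ D_generate_objects types_map → out = generate_objects_alt types_map
instance (types_map : List (String × String)) (out : String) : Decidable (Spec_generate_objects types_map out) := by unfold Spec_generate_objects; infer_instance
def pvDiffWitness_generate_objects : (List (String × String)) := ([])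
def pvDiffWitnessOut_generate_objects : String × String := ("  )", "  (:objects\n  )")

-- ===== CLAIM (what is proved, stated in full; the proofs are below) =====
def Claim_unchanged_generate_objects : Prop := ∀ (types_map : List (String × String)), Dom_generate_objects types_map → Spec_generate_objects types_map (generate_objects types_map)
def Claim_changed_generate_objects : Prop := Dom_generate_objects (pvDiffWitness_generate_objects) ∧ D_generate_objects (pvDiffWitness_generate_objects) ∧ generate_objects (pvDiffWitness_generate_objects) = pvDiffWitnessOut_generate_objects.1 ∧ generate_objects_alt (pvDiffWitness_generate_objects) = pvDiffWitnessOut_generate_objects.2 ∧ pvDiffWitnessOut_generate_objects.1 ≠ pvDiffWitnessOut_generate_objects.2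
def Claim_exact_generate_objects : Prop := ∀ (types_map : List (String × String)), Dom_generate_objects types_map → D_generate_objects types_map → generate_objects types_map ≠ generate_objects_alt types_map

-- ===== LEMMAS AND PROOFS =====

-- A's "if missing: insert []; then append" step is exactly d.modify.
theorem pvGroupStep (d : PySem.Dict String (List String)) (t v : String) :
    (let d' := if d.contains t then d else d.insert t ([] : List String)
     d'.modify t [] (fun ls => ls ++ [v])) = d.modify t [] (fun ls => ls ++ [v]) := by
  by_cases h : d.contains t = true
  · simp [h]
  · have h' : d.contains t = false := by simpa using h
    simp [h', PySem.Dict.modify, PySem.Dict.getD_insert_self,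
      PySem.Dict.insert_insert_self, PySem.Dict.getD_of_not_contains _ _ h']

theorem pvGrouped_eq (l : List (String × String)) :
    (l.foldl (fun d p =>
      let d' := if d.contains p.2 then d else d.insert p.2 ([] : List String)
      d'.modify p.2 [] (fun ls => ls ++ [p.1])) PySem.Dict.empty)
    = l.foldl (fun d p => d.modify p.2 [] (fun ls => ls ++ [p.1])) PySem.Dict.empty := by
  exact PySem.List.foldl_congr_mem l _ _ _ (fun acc x _ => pvGroupStep acc x.2 x.1)

theorem pvGrouped_keys (l : List (String × String)) :
    (l.foldl (fun d p => d.modify p.2 [] (fun ls => ls ++ [p.1]))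
        (PySem.Dict.empty : PySem.Dict String (List String))).keys
    = PySem.Set.ofList (l.map Prod.snd) := by
  rw [PySem.Dict.keys_foldl_modify_key l Prod.snd [] (fun _ p ls => ls ++ [p.1])]
  simp [PySem.Dict.keys, PySem.Dict.empty, PySem.Set.update_nil_left]

theorem pvGrouped_getD (l : List (String × String)) (t : String) :
    (l.foldl (fun d p => d.modify p.2 [] (fun ls => ls ++ [p.1]))
        (PySem.Dict.empty : PySem.Dict String (List String))).getD t []
    = (l.filter (fun p => p.2 == t)).map Prod.fst := by
  have h1 : (l.foldl (fun d p => d.modify p.2 [] (fun ls => ls ++ [p.1]))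
        (PySem.Dict.empty : PySem.Dict String (List String)))
      = (l.map Prod.swap).foldl (fun d q => d.modify q.1 [] (fun ls => ls ++ [q.2])) PySem.Dict.empty := by
    rw [List.foldl_map]; simp [Prod.swap]
  rw [h1, PySem.Dict.getD_foldl_modify_append]
  rw [List.filter_map]
  simp [Function.comp_def, Prod.swap, PySem.Dict.getD_empty]

theorem pvItems_ne_nil (tm : List (String × String)) (h : tm ≠ []) :
    (PySem.Dict.ofList tm).items ≠ [] := by
  intro hit
  have hk : (PySem.Dict.ofList tm).keys = PySem.Set.ofList (tm.map Prod.fst) := by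
    show (List.foldl (fun acc p => acc.insert p.1 p.2) PySem.Dict.empty tm).keys = _
    rw [PySem.Dict.keys_foldl_insert_key tm Prod.fst (fun _ p => p.2)]
    simp [PySem.Dict.keys, PySem.Dict.empty, PySem.Set.update_nil_left]
  cases tm with
  | nil => exact h rfl
  | cons a l =>
    have hm : a.1 ∈ (PySem.Dict.ofList (a :: l)).keys := by
      rw [hk]; exact (PySem.Set.mem_ofList _ _).mpr (by simp)
    rw [PySem.Dict.keys, hit] at hm
    simp at hm

theorem pvJoin_cons_ne_nil (nl a : List Char) (X : List (List Char)) (h : X ≠ []) :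
    PySem.Chars.join nl (a :: X) = a ++ nl ++ PySem.Chars.join nl X := by
  cases X with
  | nil => exact absurd rfl h
  | cons b Y => exact PySem.Chars.join_cons_cons nl a b Y

theorem pvJoinA (nl close : List Char) (ps : List (List Char × List Char)) (p : List Char × List Char) :
    PySem.Chars.join nl ((((p :: ps).flatMap (fun q => [q.1, q.2, []])).dropLast) ++ [close])
    = PySem.Chars.join (nl ++ nl) ((p :: ps).map (fun q => q.1 ++ nl ++ q.2)) ++ (nl ++ close) := by
  induction ps generalizing p with
  | nil =>
    simp [PySem.Chars.join_cons_cons, PySem.Chars.join_singleton]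
  | cons q qs ih =>
    have hne : ((q :: qs).flatMap (fun r => [r.1, r.2, ([] : List Char)])) ≠ [] := by
      simp [List.flatMap_cons]
    rw [List.flatMap_cons]
    rw [List.dropLast_append_of_ne_nil hne, List.append_assoc]
    have hY : (((q :: qs).flatMap (fun r => [r.1, r.2, ([] : List Char)])).dropLast) ++ [close] ≠ [] := by
      simp
    rw [show ([p.1, p.2, ([] : List Char)] : List (List Char)) ++ (((q :: qs).flatMap (fun r => [r.1, r.2, ([] : List Char)])).dropLast ++ [close]) = p.1 :: p.2 :: [] :: ((((q :: qs).flatMap (fun r => [r.1, r.2, ([] : List Char)])).dropLast) ++ [close]) from rfl]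
    rw [PySem.Chars.join_cons_cons, PySem.Chars.join_cons_cons, pvJoin_cons_ne_nil nl [] _ hY]
    rw [ih q]
    conv_rhs => rw [List.map_cons, pvJoin_cons_ne_nil (nl ++ nl) (p.1 ++ nl ++ p.2) (List.map (fun q => q.1 ++ nl ++ q.2) (q :: qs)) (by simp)]
    simp

theorem pvCharsMain (nl objc closec : List Char) (ps : List (List Char × List Char))
    (p0 : List Char × List Char) :
    PySem.Chars.join nl ((objc :: (p0 :: ps).flatMap (fun q => [q.1, q.2, []])).dropLast ++ [closec])
    = (objc ++ nl) ++ (PySem.Chars.join (nl ++ nl) ((p0 :: ps).map (fun q => q.1 ++ nl ++ q.2)) ++ (nl ++ closec)) := by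
  have hne : ((p0 :: ps).flatMap (fun q => [q.1, q.2, ([] : List Char)])) ≠ [] := by
    simp [List.flatMap_cons]
  rw [show objc :: (p0 :: ps).flatMap (fun q => [q.1, q.2, ([] : List Char)])
      = [objc] ++ (p0 :: ps).flatMap (fun q => [q.1, q.2, ([] : List Char)]) from rfl]
  rw [List.dropLast_append_of_ne_nil hne, List.append_assoc]
  rw [show ([objc] : List (List Char)) ++ (((p0 :: ps).flatMap (fun q => [q.1, q.2, ([] : List Char)])).dropLast ++ [closec]) = objc :: (((p0 :: ps).flatMap (fun q => [q.1, q.2, ([] : List Char)])).dropLast ++ [closec]) from rfl]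
  rw [pvJoin_cons_ne_nil nl objc _ (by simp), pvJoinA nl closec ps p0]

theorem pvMain (tm : List (String × String)) (h : tm ≠ []) :
    generate_objects tm = generate_objects_alt tm := by
  have hitems : (PySem.Dict.ofList tm).items ≠ [] := pvItems_ne_nil tm h
  unfold generate_objects generate_objects_alt
  simp only [pvGrouped_eq, pvGrouped_keys, pvGrouped_getD]
  set its := (PySem.Dict.ofList tm).items with hits
  set ts := PySem.List.sorted (PySem.Set.ofList (List.map Prod.snd its)) (fun s => s) false with hts
  have hts_ne : ts ≠ [] := by
    rw [hts]
    intro hnil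
    rw [PySem.List.sorted_eq_nil_iff] at hnil
    cases hcase : its with
    | nil => exact hitems hcase
    | cons a l =>
      have hm : a.2 ∈ PySem.Set.ofList (List.map Prod.snd its) :=
        (PySem.Set.mem_ofList _ _).mpr (by rw [hcase]; simp)
      rw [hnil] at hm
      simp at hm
  rw [if_neg (by intro hx; exact hts_ne (List.map_eq_nil_iff.mp hx))]
  rw [PySem.List.foldl_congr_mem ts _
      (fun acc t => acc ++ ["    ; " ++ t,
        "    " ++ PySem.Str.join " " (PySem.List.sorted (List.map Prod.fst (List.filter (fun p => p.2 == t) its)) (fun s => s) false) ++ " - " ++ t,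
        ""]) _
      (by intro acc x _; simp)]
  rw [PySem.List.foldl_append_eq_flatMap]
  rw [PySem.List.slice_to_neg_one]
  obtain ⟨t0, ts', hcons⟩ := List.exists_cons_of_ne_nil hts_ne
  rw [hcons]
  refine String.toList_inj.mp ?_
  simp only [PySem.Str.toList_join, String.toList_append, List.map_append, List.map_dropLast,
    List.map_flatMap, List.map_cons, List.map_nil, List.singleton_append]
  simp only [show "".toList = ([] : List Char) from rfl]
  rw [show List.flatMap
        (fun a =>
          ["    ; ".toList ++ a.toList,
            "    ".toList ++
              PySem.Chars.join " ".toList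
                (List.map String.toList
                  (PySem.List.sorted (List.map Prod.fst (List.filter (fun p => p.2 == a) its)) (fun s => s) false)) ++
              " - ".toList ++ a.toList,
            ([] : List Char)])
        (t0 :: ts')
      = List.flatMap (fun q => [q.1, q.2, ([] : List Char)])
          (List.map (fun t => ("    ; ".toList ++ t.toList,
            "    ".toList ++
              PySem.Chars.join " ".toList
                (List.map String.toList
                  (PySem.List.sorted (List.map Prod.fst (List.filter (fun p => p.2 == t) its)) (fun s => s) false)) ++
              " - ".toList ++ t.toList)) (t0 :: ts'))
      from (List.flatMap_map
        (fun t => (("    ; ".toList ++ t.toList : List Char),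
          ("    ".toList ++
            PySem.Chars.join " ".toList
              (List.map String.toList
                (PySem.List.sorted (List.map Prod.fst (List.filter (fun p => p.2 == t) its)) (fun s => s) false)) ++
            " - ".toList ++ t.toList : List Char)))
        (fun q => [q.1, q.2, ([] : List Char)]) (t0 :: ts')).symm]
  rw [List.map_cons]
  rw [pvCharsMain "\n".toList "  (:objects".toList "  )".toList]
  simp only [List.map_map, Function.comp_def, List.map_cons,
    PySem.Str.toList_join, String.toList_append,
    show "  (:objects\n".toList = "  (:objects".toList ++ "\n".toList from rfl,
    show "\n  )".toList = "\n".toList ++ "  )".toList from rfl,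
    show "\n\n".toList = "\n".toList ++ "\n".toList from rfl,
    show "\n    ".toList = "\n".toList ++ "    ".toList from rfl,
    List.append_assoc]


-- ===== VERDICT (by name: the statement is the Claim_ definition above) =====
theorem generate_objects_spec : Claim_unchanged_generate_objects := by
  intro tm _ hnd
  exact pvMain tm hnd

theorem generate_objects_changed : Claim_changed_generate_objects := by
  unfold Claim_changed_generate_objects; decide

theorem generate_objects_tight : Claim_exact_generate_objects := by
  intro tm _ hd
  subst hd
  decide
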